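-- pv_equiv track=rewrite | github.com/Kitsunebi45/SparkleMask | text_analysis.py | _fallback_pos_tag
-- ===== SOURCE A (Python) =====
-- def _fallback_pos_tag(words: list) -> list:
--     """Crude POS tagging without NLTK — pattern-based heuristics."""
--     tagged = []
--     for w in words:
--         lower = w.lower()
--         if not w[0].isalnum() if w else True:
--             tagged.append((w, '.'))
--         elif lower in ('the', 'a', 'an', 'this', 'that', 'these', 'those'):
--             tagged.append((w, 'DT'))
--         elif lower in ('is', 'are', 'was', 'were', 'be', 'been', 'being',
--                         'have', 'has', 'had', 'do', 'does', 'did',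
--                         'will', 'would', 'could', 'should', 'might', 'can', 'may'):
--             tagged.append((w, 'VB'))
--         elif lower in ('i', 'we', 'you', 'he', 'she', 'it', 'they',
--                         'me', 'us', 'him', 'her', 'them'):
--             tagged.append((w, 'PRP'))
--         elif lower in ('and', 'but', 'or', 'so', 'yet', 'nor'):
--             tagged.append((w, 'CC'))
--         elif lower in ('in', 'on', 'at', 'to', 'for', 'with', 'by',
--                         'from', 'of', 'about', 'into', 'through', 'between'):
--             tagged.append((w, 'IN'))
--         elif lower.endswith('ly'):
--             tagged.append((w, 'RB'))
--         elif lower.endswith(('ing', 'ed', 'en', 'ize', 'ise', 'ate', 'ify')):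
--             tagged.append((w, 'VB'))
--         elif lower.endswith(('tion', 'sion', 'ment', 'ness', 'ity', 'ence', 'ance')):
--             tagged.append((w, 'NN'))
--         elif lower.endswith(('ful', 'less', 'ous', 'ive', 'able', 'ible', 'al', 'ical')):
--             tagged.append((w, 'JJ'))
--         elif w[0].isupper() and len(w) > 1:
--             tagged.append((w, 'NNP'))
--         else:
--             tagged.append((w, 'NN'))
--     return tagged
-- ===== SOURCE B (Python) =====
-- # Rule-major tagging: rules are applied lowest-priority first, each as a full
-- # pass over the word list overwriting the tag array ("last writer wins"),
-- # so the highest-priority matching rule ends up owning each slot.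
--
-- RULES = [  # lowest priority first; later passes overwrite earlier ones
--     (lambda w: len(w) > 1 and w[0].isupper(), 'NNP'),
--     (lambda w: w.lower().endswith(('ful', 'less', 'ous', 'ive', 'able', 'ible', 'al', 'ical')), 'JJ'),
--     (lambda w: w.lower().endswith(('tion', 'sion', 'ment', 'ness', 'ity', 'ence', 'ance')), 'NN'),
--     (lambda w: w.lower().endswith(('ing', 'ed', 'en', 'ize', 'ise', 'ate', 'ify')), 'VB'),
--     (lambda w: w.lower().endswith('ly'), 'RB'),
--     (lambda w: w.lower() in ('in', 'on', 'at', 'to', 'for', 'with', 'by',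
--                              'from', 'of', 'about', 'into', 'through', 'between'), 'IN'),
--     (lambda w: w.lower() in ('and', 'but', 'or', 'so', 'yet', 'nor'), 'CC'),
--     (lambda w: w.lower() in ('i', 'we', 'you', 'he', 'she', 'it', 'they',
--                              'me', 'us', 'him', 'her', 'them'), 'PRP'),
--     (lambda w: w.lower() in ('is', 'are', 'was', 'were', 'be', 'been', 'being',
--                              'have', 'has', 'had', 'do', 'does', 'did',
--                              'will', 'would', 'could', 'should', 'might', 'can', 'may'), 'VB'),
--     (lambda w: w.lower() in ('the', 'a', 'an', 'this', 'that', 'these', 'those'), 'DT'),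
--     (lambda w: not w or not w[0].isalnum(), '.'),
-- ]
--
--
-- def _fallback_pos_tag(words: list) -> list:
--     tags = ['NN'] * len(words)
--     for pred, tag in RULES:
--         for i, w in enumerate(words):
--             if pred(w):
--                 tags[i] = tag
--     return list(zip(words, tags))
-- ===== Notes on version B (the rewrite author's own statement) =====
-- stated objective: alternative
-- what changed: Replaces A's single word-major pass with an 11-way first-match cascade by a rule-major algorithm: eleven staged passes over the whole list, one per rule from lowest to highest priority, each overwriting a tag array (last writer wins), then zipping words with tags.
import Mathlib
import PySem

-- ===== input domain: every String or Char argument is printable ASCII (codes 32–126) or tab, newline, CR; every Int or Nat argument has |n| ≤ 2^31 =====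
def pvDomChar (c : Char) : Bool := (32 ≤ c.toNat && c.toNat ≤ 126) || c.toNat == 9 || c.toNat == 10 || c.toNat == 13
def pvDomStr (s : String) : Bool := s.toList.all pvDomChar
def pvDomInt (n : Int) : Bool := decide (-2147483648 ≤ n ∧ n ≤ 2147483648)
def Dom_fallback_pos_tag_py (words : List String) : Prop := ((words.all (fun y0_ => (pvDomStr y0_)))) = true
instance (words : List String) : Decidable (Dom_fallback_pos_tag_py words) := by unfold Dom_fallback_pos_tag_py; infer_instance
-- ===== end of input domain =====

-- B replaces A's single word-major pass with its 11-way first-match cascade by a rule-major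
-- algorithm: one overwriting pass over the whole list per rule, lowest priority first
-- (last writer wins); objective: alternative, same asymptotic cost.

-- ===== PORT A =====
def fallback_pos_tag_py (words : List String) : List (String × String) :=
  words.foldl (fun tagged w =>
    let lower := PySem.Str.lower w
    tagged ++ [(w,
      if (match w.toList with | [] => true | c :: _ => !(PySem.Chars.isalnum c)) then "."
      else if (["the", "a", "an", "this", "that", "these", "those"]).contains lower then "DT"
      else if (["is", "are", "was", "were", "be", "been", "being", "have", "has", "had", "do", "does", "did", "will", "would", "could", "should", "might", "can", "may"]).contains lower then "VB"
      else if (["i", "we", "you", "he", "she", "it", "they", "me", "us", "him", "her", "them"]).contains lower then "PRP"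
      else if (["and", "but", "or", "so", "yet", "nor"]).contains lower then "CC"
      else if (["in", "on", "at", "to", "for", "with", "by", "from", "of", "about", "into", "through", "between"]).contains lower then "IN"
      else if PySem.Str.endswith lower "ly" then "RB"
      else if (PySem.Str.endswith lower "ing" || PySem.Str.endswith lower "ed" || PySem.Str.endswith lower "en" || PySem.Str.endswith lower "ize" || PySem.Str.endswith lower "ise" || PySem.Str.endswith lower "ate" || PySem.Str.endswith lower "ify") then "VB"
      else if (PySem.Str.endswith lower "tion" || PySem.Str.endswith lower "sion" || PySem.Str.endswith lower "ment" || PySem.Str.endswith lower "ness" || PySem.Str.endswith lower "ity" || PySem.Str.endswith lower "ence" || PySem.Str.endswith lower "ance") then "NN"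
      else if (PySem.Str.endswith lower "ful" || PySem.Str.endswith lower "less" || PySem.Str.endswith lower "ous" || PySem.Str.endswith lower "ive" || PySem.Str.endswith lower "able" || PySem.Str.endswith lower "ible" || PySem.Str.endswith lower "al" || PySem.Str.endswith lower "ical") then "JJ"
      else if ((match w.toList with | [] => false | c :: _ => PySem.Chars.isupper c) && decide (1 < PySem.Str.len w)) then "NNP"
      else "NN")]) []

-- ===== PORT B =====
-- B-side helpers: the ordered rule table (lowest priority first) and one overwriting pass per rule.
def BRULES : List ((String → Bool) × String) :=
  [ (fun w => decide (1 < PySem.Str.len w) && (match w.toList with | [] => false | c :: _ => PySem.Chars.isupper c), "NNP")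
  , (fun w => (PySem.Str.endswith (PySem.Str.lower w) "ful" || PySem.Str.endswith (PySem.Str.lower w) "less" || PySem.Str.endswith (PySem.Str.lower w) "ous" || PySem.Str.endswith (PySem.Str.lower w) "ive" || PySem.Str.endswith (PySem.Str.lower w) "able" || PySem.Str.endswith (PySem.Str.lower w) "ible" || PySem.Str.endswith (PySem.Str.lower w) "al" || PySem.Str.endswith (PySem.Str.lower w) "ical"), "JJ")
  , (fun w => (PySem.Str.endswith (PySem.Str.lower w) "tion" || PySem.Str.endswith (PySem.Str.lower w) "sion" || PySem.Str.endswith (PySem.Str.lower w) "ment" || PySem.Str.endswith (PySem.Str.lower w) "ness" || PySem.Str.endswith (PySem.Str.lower w) "ity" || PySem.Str.endswith (PySem.Str.lower w) "ence" || PySem.Str.endswith (PySem.Str.lower w) "ance"), "NN")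
  , (fun w => (PySem.Str.endswith (PySem.Str.lower w) "ing" || PySem.Str.endswith (PySem.Str.lower w) "ed" || PySem.Str.endswith (PySem.Str.lower w) "en" || PySem.Str.endswith (PySem.Str.lower w) "ize" || PySem.Str.endswith (PySem.Str.lower w) "ise" || PySem.Str.endswith (PySem.Str.lower w) "ate" || PySem.Str.endswith (PySem.Str.lower w) "ify"), "VB")
  , (fun w => PySem.Str.endswith (PySem.Str.lower w) "ly", "RB")
  , (fun w => (["in", "on", "at", "to", "for", "with", "by", "from", "of", "about", "into", "through", "between"]).contains (PySem.Str.lower w), "IN")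
  , (fun w => (["and", "but", "or", "so", "yet", "nor"]).contains (PySem.Str.lower w), "CC")
  , (fun w => (["i", "we", "you", "he", "she", "it", "they", "me", "us", "him", "her", "them"]).contains (PySem.Str.lower w), "PRP")
  , (fun w => (["is", "are", "was", "were", "be", "been", "being", "have", "has", "had", "do", "does", "did", "will", "would", "could", "should", "might", "can", "may"]).contains (PySem.Str.lower w), "VB")
  , (fun w => (["the", "a", "an", "this", "that", "these", "those"]).contains (PySem.Str.lower w), "DT")
  , (fun w => (match w.toList with | [] => true | c :: _ => !(PySem.Chars.isalnum c)), ".") ]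

-- one pass of 'for i, w in enumerate(words): if pred(w): tags[i] = tag'
def applyPass (words tags : List String) (pred : String → Bool) (tag : String) : List String :=
  (words.zip tags).map (fun p => if pred p.1 then tag else p.2)

def fallback_pos_tag_py_alt (words : List String) : List (String × String) :=
  let tags := BRULES.foldl (fun tags r => applyPass words tags r.1 r.2) (List.replicate words.length "NN")
  words.zip tags

-- ===== PRECONDITION & SPEC =====
def Spec_fallback_pos_tag_py (words : List String) (out : List (String × String)) : Prop := out = fallback_pos_tag_py_alt words
instance (words : List String) (out : List (String × String)) : Decidable (Spec_fallback_pos_tag_py words out) := by unfold Spec_fallback_pos_tag_py; infer_instance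

-- ===== CLAIM (what is proved, stated in full; the proofs are below) =====
def Claim_equal_fallback_pos_tag_py : Prop := ∀ (words : List String), Dom_fallback_pos_tag_py words → Spec_fallback_pos_tag_py words (fallback_pos_tag_py words)

-- ===== LEMMAS AND PROOFS =====

-- B's per-word residue once the passes are shown pointwise: the fold of the rules on one word.
def tagB (w : String) : String :=
  BRULES.foldl (fun t r => if r.1 w then r.2 else t) "NN"

lemma zip_map_self {α β : Type} (g : α → β) (ws : List α) :
    ws.zip (ws.map g) = ws.map (fun w => (w, g w)) := by
  induction ws with
  | nil => rfl
  | cons x xs ih => simp [ih]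

lemma applyPass_map (g : String → String) (ws : List String) (p : String → Bool) (t : String) :
    applyPass ws (ws.map g) p t = ws.map (fun w => if p w then t else g w) := by
  simp [applyPass, zip_map_self, List.map_map, Function.comp]

lemma fold_pass_map (ws : List String) (rules : List ((String → Bool) × String)) :
    ∀ g : String → String,
      rules.foldl (fun tags r => applyPass ws tags r.1 r.2) (ws.map g)
        = ws.map (fun w => rules.foldl (fun t r => if r.1 w then r.2 else t) (g w)) := by
  induction rules with
  | nil => intro g; simp
  | cons r rest ih =>
      intro g
      simp only [List.foldl_cons, applyPass_map]
      exact ih _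

lemma alt_eq_map (ws : List String) :
    fallback_pos_tag_py_alt ws = ws.map (fun w => (w, tagB w)) := by
  unfold fallback_pos_tag_py_alt
  have h : List.replicate ws.length "NN" = ws.map (fun _ => "NN") := by
    simp [List.map_const']
  rw [h, fold_pass_map, zip_map_self]
  rfl

set_option maxRecDepth 10000 in
lemma tagB_eq (w : String) :
    tagB w =
    (let lower := PySem.Str.lower w
      if (match w.toList with | [] => true | c :: _ => !(PySem.Chars.isalnum c)) then "."
      else if (["the", "a", "an", "this", "that", "these", "those"]).contains lower then "DT"
      else if (["is", "are", "was", "were", "be", "been", "being", "have", "has", "had", "do", "does", "did", "will", "would", "could", "should", "might", "can", "may"]).contains lower then "VB"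
      else if (["i", "we", "you", "he", "she", "it", "they", "me", "us", "him", "her", "them"]).contains lower then "PRP"
      else if (["and", "but", "or", "so", "yet", "nor"]).contains lower then "CC"
      else if (["in", "on", "at", "to", "for", "with", "by", "from", "of", "about", "into", "through", "between"]).contains lower then "IN"
      else if PySem.Str.endswith lower "ly" then "RB"
      else if (PySem.Str.endswith lower "ing" || PySem.Str.endswith lower "ed" || PySem.Str.endswith lower "en" || PySem.Str.endswith lower "ize" || PySem.Str.endswith lower "ise" || PySem.Str.endswith lower "ate" || PySem.Str.endswith lower "ify") then "VB"
      else if (PySem.Str.endswith lower "tion" || PySem.Str.endswith lower "sion" || PySem.Str.endswith lower "ment" || PySem.Str.endswith lower "ness" || PySem.Str.endswith lower "ity" || PySem.Str.endswith lower "ence" || PySem.Str.endswith lower "ance") then "NN"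
      else if (PySem.Str.endswith lower "ful" || PySem.Str.endswith lower "less" || PySem.Str.endswith lower "ous" || PySem.Str.endswith lower "ive" || PySem.Str.endswith lower "able" || PySem.Str.endswith lower "ible" || PySem.Str.endswith lower "al" || PySem.Str.endswith lower "ical") then "JJ"
      else if ((match w.toList with | [] => false | c :: _ => PySem.Chars.isupper c) && decide (1 < PySem.Str.len w)) then "NNP"
      else "NN") := by
  unfold tagB BRULES
  simp only [List.foldl_cons, List.foldl_nil]
  cases hw : w.toList with
  | nil => simp
  | cons c rest =>
    by_cases ha : PySem.Chars.isalnum c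
    · simp only [ha, Bool.not_true, if_neg (by simp : ¬ (false = true))]
      rw [Bool.and_comm]
    · simp [ha]

-- ===== VERDICT (by name: the statement is the Claim_ definition above) =====
theorem fallback_pos_tag_py_spec : Claim_equal_fallback_pos_tag_py := by
  intro words _
  unfold Spec_fallback_pos_tag_py fallback_pos_tag_py
  rw [PySem.List.foldl_append_singleton_eq_map, alt_eq_map]
  exact List.map_congr_left (fun w _ => by simpa using congrArg (Prod.mk w) (tagB_eq w).symm)
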